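-- pv_equiv track=rewrite | github.com/Josh-test-lab/parking-lot-simulation | event.py | bicycle_parked_in_motorcycle_space_event
-- ===== SOURCE A (Python) =====
-- def bicycle_parked_in_motorcycle_space_event(new_bicycle, bicycle_parked, remain_motorcycle_parking_space, max_bicycle_parked_in_a_motorcycle_space = 2):
--     bicycle_cannot_park = 0
--     if new_bicycle == 0:
--         return bicycle_parked, remain_motorcycle_parking_space, bicycle_cannot_park
--     if max_bicycle_parked_in_a_motorcycle_space == 1:
--         return vehicle_parked_event(new_bicycle, bicycle_parked, remain_motorcycle_parking_space)
--
--     space = int(new_bicycle / max_bicycle_parked_in_a_motorcycle_space)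
--     new_bicycle = new_bicycle % max_bicycle_parked_in_a_motorcycle_space
--
--     if space <= remain_motorcycle_parking_space:
--         remain_motorcycle_parking_space -= space
--         bicycle_parked += (max_bicycle_parked_in_a_motorcycle_space * space)
--     else:
--         bicycle_cannot_park = max_bicycle_parked_in_a_motorcycle_space * (space - remain_motorcycle_parking_space)
--         bicycle_parked += (max_bicycle_parked_in_a_motorcycle_space * remain_motorcycle_parking_space)
--         remain_motorcycle_parking_space = 0
--         while bicycle_parked % max_bicycle_parked_in_a_motorcycle_space != 0 and bicycle_cannot_park > 0:
--             bicycle_parked += 1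
--             bicycle_cannot_park -= 1
--
--     while new_bicycle > 0:
--         if bicycle_parked % max_bicycle_parked_in_a_motorcycle_space != 0:
--             bicycle_parked += 1
--         elif remain_motorcycle_parking_space > 0:
--             bicycle_parked += 1
--             remain_motorcycle_parking_space -= 1
--         elif remain_motorcycle_parking_space <= 0:
--             bicycle_cannot_park += 1
--         new_bicycle -= 1
--
--     return bicycle_parked, remain_motorcycle_parking_space, bicycle_cannot_park
--
-- def vehicle_parked_event(new_vehicle, vehicle_parked, remain_vehicle_parking_space):
--     vehicle_cannot_park = 0
--     if new_vehicle == 0: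
--         return vehicle_parked, remain_vehicle_parking_space, vehicle_cannot_park
--
--     if new_vehicle <= remain_vehicle_parking_space:
--         remain_vehicle_parking_space -= new_vehicle
--         vehicle_parked += new_vehicle
--     else:
--         vehicle_cannot_park = new_vehicle - remain_vehicle_parking_space
--         vehicle_parked += remain_vehicle_parking_space
--         remain_vehicle_parking_space = 0
--
--     return vehicle_parked, remain_vehicle_parking_space, vehicle_cannot_park
-- ===== SOURCE B (Python) =====
-- def bicycle_parked_in_motorcycle_space_event(new_bicycle, bicycle_parked, remain_motorcycle_parking_space, max_bicycle_parked_in_a_motorcycle_space=2):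
--     # Closed-form: no unit-increment loops.
--     n = new_bicycle
--     p = bicycle_parked
--     r = remain_motorcycle_parking_space
--     m = max_bicycle_parked_in_a_motorcycle_space
--     if n == 0:
--         return p, r, 0
--     space, leftover = divmod(n, m)
--     if space <= r:
--         p += m * space
--         r -= space
--         t = (-p) % m                    # free seats in the partially filled space
--         k = min(leftover, t + m * r)    # leftover bikes that still fit
--         return p + k, r - (k - t + m - 1) // m, leftover - k
--     t = (-(p + m * r)) % m
--     return p + m * r + t, 0, m * (space - r) - t + leftover
-- ===== Notes on version B (the rewrite author's own statement) =====
-- stated objective: faster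
-- what changed: The two unit-increment while loops (topping up a partially filled space and parking the leftover bikes one by one) are replaced by closed-form min/mod/ceil-division arithmetic, so B is loop-free O(1) while A can iterate up to max_bicycle_parked_in_a_motorcycle_space times.
-- intended difference: On a negative new_bicycle count that is not a multiple of a capacity >= 2, A pairs toward-zero truncated int(n/m) with a floored n % m, so its space count and leftover are inconsistent (space*m + leftover != n) and it returns values like un-parking bikes while freeing spaces; B uses Python's divmod consistently, which is the intended arithmetic. — e.g. on bicycle_parked_in_motorcycle_space_event(-3, 0, 5, 2): A returns [-1, 5, 0], B returns [-3, 6, 0]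
-- outside the precondition, e.g. on bicycle_parked_in_motorcycle_space_event(5, 0, 3, -2): A returns (4, 5, 0), B returns (-6, -1, 11); on bicycle_parked_in_motorcycle_space_event(5, 0, 3, 0): A raises ZeroDivisionError, B raises ZeroDivisionError
import Mathlib
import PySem

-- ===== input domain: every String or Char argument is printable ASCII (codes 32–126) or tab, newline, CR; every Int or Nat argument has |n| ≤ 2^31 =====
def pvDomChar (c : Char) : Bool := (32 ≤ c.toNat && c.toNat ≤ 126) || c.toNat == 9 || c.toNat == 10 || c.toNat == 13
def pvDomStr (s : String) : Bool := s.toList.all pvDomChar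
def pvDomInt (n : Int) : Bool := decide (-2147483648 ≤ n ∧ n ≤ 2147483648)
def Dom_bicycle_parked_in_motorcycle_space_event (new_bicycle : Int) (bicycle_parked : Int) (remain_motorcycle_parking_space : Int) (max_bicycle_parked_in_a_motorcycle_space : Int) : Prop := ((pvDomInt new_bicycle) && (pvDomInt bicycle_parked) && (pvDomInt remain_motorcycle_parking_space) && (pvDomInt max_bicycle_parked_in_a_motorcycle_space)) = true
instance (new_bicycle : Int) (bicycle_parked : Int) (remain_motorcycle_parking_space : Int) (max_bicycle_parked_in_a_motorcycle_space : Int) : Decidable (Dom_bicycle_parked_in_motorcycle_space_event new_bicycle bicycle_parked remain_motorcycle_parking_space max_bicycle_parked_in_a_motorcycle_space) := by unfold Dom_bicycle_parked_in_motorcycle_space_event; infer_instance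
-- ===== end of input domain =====

-- ===== PORT A =====
-- B replaces A's two unit-increment while loops by closed-form min/mod arithmetic (loop-free; measured faster).
-- On negative non-multiple bicycle counts A's truncated int(n/m) is inconsistent with its floored %; B uses divmod (see D_).
-- A's first while loop: fuel = bicycle_cannot_park.toNat at entry (the loop decrements it each step).
def pvTopUpA (m : Int) : Nat → Int → Int → Int × Int
  | 0, p, c => (p, c)
  | f+1, p, c =>
    if PySem.Int.mod p m ≠ 0 ∧ 0 < c then pvTopUpA m f (p+1) (c-1) else (p, c)

-- A's second while loop: fuel = new_bicycle.toNat (the loop decrements new_bicycle each step).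
def pvParkLoopA (m : Int) : Nat → Int → Int → Int → Int × Int × Int
  | 0, p, r, c => (p, r, c)
  | f+1, p, r, c =>
    if PySem.Int.mod p m ≠ 0 then pvParkLoopA m f (p+1) r c
    else if 0 < r then pvParkLoopA m f (p+1) (r-1) c
    else if r ≤ 0 then pvParkLoopA m f p r (c+1)
    else pvParkLoopA m f p r c

def vehicle_parked_event (new_vehicle : Int) (vehicle_parked : Int) (remain_vehicle_parking_space : Int) : List Int :=
  if new_vehicle = 0 then [vehicle_parked, remain_vehicle_parking_space, 0]
  else if new_vehicle ≤ remain_vehicle_parking_space then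
    [vehicle_parked + new_vehicle, remain_vehicle_parking_space - new_vehicle, 0]
  else
    [vehicle_parked + remain_vehicle_parking_space, 0, new_vehicle - remain_vehicle_parking_space]

def bicycle_parked_in_motorcycle_space_event (new_bicycle : Int) (bicycle_parked : Int) (remain_motorcycle_parking_space : Int) (max_bicycle_parked_in_a_motorcycle_space : Int) : List Int :=
  if new_bicycle = 0 then [bicycle_parked, remain_motorcycle_parking_space, 0]
  else if max_bicycle_parked_in_a_motorcycle_space = 1 then
    vehicle_parked_event new_bicycle bicycle_parked remain_motorcycle_parking_space
  else
    -- int(new_bicycle / m): float division then truncation toward zero; on |new_bicycle| ≤ 2^31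
    -- (< 2^53, so the float quotient never crosses an integer) this is exactly Int.tdiv.
    let space := Int.tdiv new_bicycle max_bicycle_parked_in_a_motorcycle_space
    let nb := PySem.Int.mod new_bicycle max_bicycle_parked_in_a_motorcycle_space
    if space ≤ remain_motorcycle_parking_space then
      let p1 := bicycle_parked + max_bicycle_parked_in_a_motorcycle_space * space
      let r1 := remain_motorcycle_parking_space - space
      let out := pvParkLoopA max_bicycle_parked_in_a_motorcycle_space nb.toNat p1 r1 0
      [out.1, out.2.1, out.2.2]
    else
      let c0 := max_bicycle_parked_in_a_motorcycle_space * (space - remain_motorcycle_parking_space)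
      let p0 := bicycle_parked + max_bicycle_parked_in_a_motorcycle_space * remain_motorcycle_parking_space
      let tc := pvTopUpA max_bicycle_parked_in_a_motorcycle_space c0.toNat p0 c0
      let out := pvParkLoopA max_bicycle_parked_in_a_motorcycle_space nb.toNat tc.1 0 tc.2
      [out.1, out.2.1, out.2.2]

-- ===== PORT B =====
def bicycle_parked_in_motorcycle_space_event_alt (new_bicycle : Int) (bicycle_parked : Int) (remain_motorcycle_parking_space : Int) (max_bicycle_parked_in_a_motorcycle_space : Int) : List Int :=
  if new_bicycle = 0 then [bicycle_parked, remain_motorcycle_parking_space, 0]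
  else
    let m := max_bicycle_parked_in_a_motorcycle_space
    -- divmod(n, m)
    let space := PySem.Int.floordiv new_bicycle m
    let leftover := PySem.Int.mod new_bicycle m
    if space ≤ remain_motorcycle_parking_space then
      let p1 := bicycle_parked + m * space
      let r1 := remain_motorcycle_parking_space - space
      let t := PySem.Int.mod (-p1) m          -- free seats in the partially filled space
      let k := min leftover (t + m * r1)      -- leftover bikes that still fit
      [p1 + k, r1 - PySem.Int.floordiv (k - t + m - 1) m, leftover - k]
    else
      let t := PySem.Int.mod (-(bicycle_parked + m * remain_motorcycle_parking_space)) m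
      [bicycle_parked + m * remain_motorcycle_parking_space + t, 0,
       m * (space - remain_motorcycle_parking_space) - t + leftover]

-- ===== PRECONDITION & SPEC =====
-- Pre_ restricts to a positive per-space capacity, the function's natural domain: with capacity 0
-- A raises ZeroDivisionError, and a negative capacity is meaningless (A then "parks" negative
-- bicycles; B's floor divmod gives other values there).
def Pre_bicycle_parked_in_motorcycle_space_event (new_bicycle : Int) (bicycle_parked : Int) (remain_motorcycle_parking_space : Int) (max_bicycle_parked_in_a_motorcycle_space : Int) : Prop :=
  1 ≤ max_bicycle_parked_in_a_motorcycle_space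
instance (new_bicycle : Int) (bicycle_parked : Int) (remain_motorcycle_parking_space : Int) (max_bicycle_parked_in_a_motorcycle_space : Int) : Decidable (Pre_bicycle_parked_in_motorcycle_space_event new_bicycle bicycle_parked remain_motorcycle_parking_space max_bicycle_parked_in_a_motorcycle_space) := by unfold Pre_bicycle_parked_in_motorcycle_space_event; infer_instance

def pvWitness_bicycle_parked_in_motorcycle_space_event : Int × Int × Int × Int := (5, 0, 2, 2)

-- On a negative new_bicycle count that is not a multiple of a capacity ≥ 2, A pairs a toward-zero
-- truncated space count int(n/m) with a floored remainder n % m (so space*m + leftover ≠ n and A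
-- returns inconsistent values such as un-parking bikes while freeing spaces); B uses Python's
-- divmod consistently, which is the intended arithmetic.
def D_bicycle_parked_in_motorcycle_space_event (new_bicycle : Int) (bicycle_parked : Int) (remain_motorcycle_parking_space : Int) (max_bicycle_parked_in_a_motorcycle_space : Int) : Prop :=
  new_bicycle < 0 ∧ 2 ≤ max_bicycle_parked_in_a_motorcycle_space ∧
    ¬ (max_bicycle_parked_in_a_motorcycle_space ∣ new_bicycle)
instance (new_bicycle : Int) (bicycle_parked : Int) (remain_motorcycle_parking_space : Int) (max_bicycle_parked_in_a_motorcycle_space : Int) : Decidable (D_bicycle_parked_in_motorcycle_space_event new_bicycle bicycle_parked remain_motorcycle_parking_space max_bicycle_parked_in_a_motorcycle_space) := by unfold D_bicycle_parked_in_motorcycle_space_event; infer_instance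

def Spec_bicycle_parked_in_motorcycle_space_event (new_bicycle : Int) (bicycle_parked : Int) (remain_motorcycle_parking_space : Int) (max_bicycle_parked_in_a_motorcycle_space : Int) (out : List Int) : Prop := ¬ D_bicycle_parked_in_motorcycle_space_event new_bicycle bicycle_parked remain_motorcycle_parking_space max_bicycle_parked_in_a_motorcycle_space → out = bicycle_parked_in_motorcycle_space_event_alt new_bicycle bicycle_parked remain_motorcycle_parking_space max_bicycle_parked_in_a_motorcycle_space
instance (new_bicycle : Int) (bicycle_parked : Int) (remain_motorcycle_parking_space : Int) (max_bicycle_parked_in_a_motorcycle_space : Int) (out : List Int) : Decidable (Spec_bicycle_parked_in_motorcycle_space_event new_bicycle bicycle_parked remain_motorcycle_parking_space max_bicycle_parked_in_a_motorcycle_space out) := by unfold Spec_bicycle_parked_in_motorcycle_space_event; infer_instance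

def pvDiffWitness_bicycle_parked_in_motorcycle_space_event : Int × Int × Int × Int := (-3, 0, 5, 2)
def pvDiffWitnessOut_bicycle_parked_in_motorcycle_space_event : (List Int) × (List Int) := ([-1, 5, 0], [-3, 6, 0])

-- ===== CLAIM (what is proved, stated in full; the proofs are below) =====
def Claim_unchanged_bicycle_parked_in_motorcycle_space_event : Prop := ∀ (new_bicycle : Int) (bicycle_parked : Int) (remain_motorcycle_parking_space : Int) (max_bicycle_parked_in_a_motorcycle_space : Int), Dom_bicycle_parked_in_motorcycle_space_event new_bicycle bicycle_parked remain_motorcycle_parking_space max_bicycle_parked_in_a_motorcycle_space → Pre_bicycle_parked_in_motorcycle_space_event new_bicycle bicycle_parked remain_motorcycle_parking_space max_bicycle_parked_in_a_motorcycle_space → Spec_bicycle_parked_in_motorcycle_space_event new_bicycle bicycle_parked remain_motorcycle_parking_space max_bicycle_parked_in_a_motorcycle_space (bicycle_parked_in_motorcycle_space_event new_bicycle bicycle_parked remain_motorcycle_parking_space max_bicycle_parked_in_a_motorcycle_space)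
def Claim_changed_bicycle_parked_in_motorcycle_space_event : Prop := Dom_bicycle_parked_in_motorcycle_space_event (pvDiffWitness_bicycle_parked_in_motorcycle_space_event.1) (pvDiffWitness_bicycle_parked_in_motorcycle_space_event.2.1) (pvDiffWitness_bicycle_parked_in_motorcycle_space_event.2.2.1) (pvDiffWitness_bicycle_parked_in_motorcycle_space_event.2.2.2) ∧ Pre_bicycle_parked_in_motorcycle_space_event (pvDiffWitness_bicycle_parked_in_motorcycle_space_event.1) (pvDiffWitness_bicycle_parked_in_motorcycle_space_event.2.1) (pvDiffWitness_bicycle_parked_in_motorcycle_space_event.2.2.1) (pvDiffWitness_bicycle_parked_in_motorcycle_space_event.2.2.2) ∧ D_bicycle_parked_in_motorcycle_space_event (pvDiffWitness_bicycle_parked_in_motorcycle_space_event.1) (pvDiffWitness_bicycle_parked_in_motorcycle_space_event.2.1) (pvDiffWitness_bicycle_parked_in_motorcycle_space_event.2.2.1) (pvDiffWitness_bicycle_parked_in_motorcycle_space_event.2.2.2) ∧ bicycle_parked_in_motorcycle_space_event (pvDiffWitness_bicycle_parked_in_motorcycle_space_event.1) (pvDiffWitness_bicycle_parked_in_motorcycle_space_event.2.1)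 (pvDiffWitness_bicycle_parked_in_motorcycle_space_event.2.2.1) (pvDiffWitness_bicycle_parked_in_motorcycle_space_event.2.2.2) = pvDiffWitnessOut_bicycle_parked_in_motorcycle_space_event.1 ∧ bicycle_parked_in_motorcycle_space_event_alt (pvDiffWitness_bicycle_parked_in_motorcycle_space_event.1) (pvDiffWitness_bicycle_parked_in_motorcycle_space_event.2.1) (pvDiffWitness_bicycle_parked_in_motorcycle_space_event.2.2.1) (pvDiffWitness_bicycle_parked_in_motorcycle_space_event.2.2.2) = pvDiffWitnessOut_bicycle_parked_in_motorcycle_space_event.2 ∧ pvDiffWitnessOut_bicycle_parked_in_motorcycle_space_event.1 ≠ pvDiffWitnessOut_bicycle_parked_in_motorcycle_space_event.2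

-- ===== LEMMAS AND PROOFS =====

theorem pv_neg_emod_zero (p m : Int) : (-p) % m = 0 ↔ p % m = 0 := by
  constructor <;> intro h
  · exact Int.emod_eq_zero_of_dvd ((dvd_neg).mp (Int.dvd_of_emod_eq_zero h))
  · exact Int.emod_eq_zero_of_dvd ((dvd_neg).mpr (Int.dvd_of_emod_eq_zero h))

theorem pv_emod_step (p m : Int) (hm : 1 ≤ m) (h : p % m ≠ 0) :
    (-(p+1)) % m = (-p) % m - 1 := by
  have hm0 : m ≠ 0 := by omega
  have ht0 : 0 ≤ (-p) % m := Int.emod_nonneg _ hm0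
  have htm : (-p) % m < m := Int.emod_lt_of_pos _ (by omega)
  have htne : (-p) % m ≠ 0 := fun hz => h ((pv_neg_emod_zero p m).mp hz)
  have hdiv : (-p) % m + m * ((-p) / m) = -p := Int.emod_add_ediv _ _
  have hrw : -(p+1) = ((-p) % m - 1) + m * ((-p) / m) := by linarith
  rw [hrw, Int.add_mul_emod_self_left, Int.emod_eq_of_lt (by omega) (by omega)]

theorem pv_emod_fresh (p m : Int) (hm : 1 ≤ m) (h : p % m = 0) :
    (-(p+1)) % m = m - 1 := by
  obtain ⟨q, hq⟩ : m ∣ p := Int.dvd_of_emod_eq_zero h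
  subst hq
  have hrw : -(m*q+1) = (m-1) + m*(-q-1) := by ring
  rw [hrw, Int.add_mul_emod_self_left, Int.emod_eq_of_lt (by omega) (by omega)]

theorem pv_dvd_add_neg_emod (p m : Int) : m ∣ (p + (-p) % m) := by
  refine ⟨-((-p) / m), ?_⟩
  have h := Int.emod_add_ediv (-p) m
  have h2 : m * (-((-p) / m)) = -(m*((-p) / m)) := by ring
  linarith

theorem pv_min_shift (f C : Int) (hf : 0 ≤ f) (h : 1 ≤ C) :
    min f (C - 1) = min (f+1) C - 1 := by omega

theorem pvTopUpA_eq (m : Int) (hm : 1 ≤ m) : ∀ (f : Nat) (p c : Int), c = (f : Int) →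
    (-p) % m ≤ c → pvTopUpA m f p c = (p + (-p) % m, c - (-p) % m) := by
  have hm0 : m ≠ 0 := by omega
  intro f
  induction f with
  | zero =>
    intro p c h1 h2
    have ht0 : 0 ≤ (-p) % m := Int.emod_nonneg _ hm0
    have ht : (-p) % m = 0 := by omega
    simp [pvTopUpA, ht, h1]
  | succ f ih =>
    intro p c h1 h2
    have hmod : PySem.Int.mod p m = p % m := PySem.Int.mod_eq_emod_of_pos (by omega)
    by_cases hp : p % m = 0
    · have ht : (-p) % m = 0 := (pv_neg_emod_zero p m).mpr hp
      simp [pvTopUpA, hmod, hp, ht]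
    · have hc : 0 < c := by push_cast at h1; omega
      rw [pvTopUpA, if_pos ⟨by rw [hmod]; exact hp, hc⟩,
          ih (p+1) (c-1) (by push_cast at h1 ⊢; omega)
             (by rw [pv_emod_step p m hm hp]; omega),
          pv_emod_step p m hm hp]
      simp only [Prod.mk.injEq]
      constructor <;> ring

theorem pvParkLoopA_eq (m : Int) (hm : 1 ≤ m) : ∀ (f : Nat) (p r c : Int), 0 ≤ r →
    pvParkLoopA m f p r c =
      (p + min (f : Int) ((-p) % m + m * r),
       r - (min (f : Int) ((-p) % m + m * r) - (-p) % m + m - 1) / m,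
       c + ((f : Int) - min (f : Int) ((-p) % m + m * r))) := by
  have hm0 : m ≠ 0 := by omega
  intro f
  induction f with
  | zero =>
    intro p r c hr
    have ht0 : 0 ≤ (-p) % m := Int.emod_nonneg _ hm0
    have htm : (-p) % m < m := Int.emod_lt_of_pos _ (by omega)
    have hMr : 0 ≤ m * r := mul_nonneg (by omega) hr
    have hk : min ((0:Nat) : Int) ((-p) % m + m * r) = 0 :=
      min_eq_left (by push_cast; linarith)
    have hs : ((0:Int) - (-p) % m + m - 1) / m = 0 :=
      Int.ediv_eq_zero_of_lt (by omega) (by omega)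
    rw [pvParkLoopA]
    rw [show (((0:Nat)) : Int) = (0:Int) from rfl] at hk ⊢
    rw [hk, hs]
    simp
  | succ f ih =>
    intro p r c hr
    have hf0 : (0:Int) ≤ (f : Int) := by positivity
    have hcast : (((f+1:Nat)) : Int) = (f : Int) + 1 := by push_cast; ring
    have ht0 : 0 ≤ (-p) % m := Int.emod_nonneg _ hm0
    have htm : (-p) % m < m := Int.emod_lt_of_pos _ (by omega)
    have hmod : PySem.Int.mod p m = p % m := PySem.Int.mod_eq_emod_of_pos (by omega)
    have hMr : 0 ≤ m * r := mul_nonneg (by omega) hr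
    by_cases hp : p % m = 0
    · have ht : (-p) % m = 0 := (pv_neg_emod_zero p m).mpr hp
      by_cases hr0 : 0 < r
      · -- a fresh space is opened
        rw [pvParkLoopA, if_neg (by rw [hmod]; simpa using hp), if_pos hr0,
            ih (p+1) (r-1) c (by omega), pv_emod_fresh p m hm hp]
        have hCrw : (m:Int) - 1 + m * (r - 1) = ((-p) % m + m * r) - 1 := by
          rw [ht]; ring
        have h1C : 1 ≤ (-p) % m + m * r := by
          have := mul_le_mul_of_nonneg_left (show (1:Int) ≤ r by omega)
            (show (0:Int) ≤ m by omega)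
          rw [ht]; simp at this; omega
        rw [hCrw, pv_min_shift (f : Int) _ hf0 h1C, hcast]
        have hargL : min ((f:Int)+1) ((-p) % m + m * r) - 1 - (m - 1) + m - 1
            = min ((f:Int)+1) ((-p) % m + m * r) - 1 := by ring
        have hargR : min ((f:Int)+1) ((-p) % m + m * r) - (-p) % m + m - 1
            = (min ((f:Int)+1) ((-p) % m + m * r) - 1) + m * 1 := by rw [ht]; ring
        rw [hargL, hargR, Int.add_mul_ediv_left _ 1 hm0]
        simp only [Prod.mk.injEq]
        refine ⟨by first | trivial | linarith, by first | trivial | linarith, by first | trivial | linarith⟩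
      · -- no space left: the bike cannot park
        have hr' : r = 0 := by omega
        subst hr'
        rw [pvParkLoopA, if_neg (by rw [hmod]; simpa using hp), if_neg hr0,
            if_pos (by omega), ih p 0 (c+1) (by omega), hcast]
        have hC : (-p) % m + m * 0 = 0 := by rw [ht]; ring
        rw [hC]
        have hk1 : min ((f:Int)) (0:Int) = 0 := min_eq_right hf0
        have hk2 : min ((f:Int)+1) (0:Int) = 0 := min_eq_right (by omega)
        have hs : ((0:Int) - (-p) % m + m - 1) / m = 0 :=
          Int.ediv_eq_zero_of_lt (by omega) (by omega)
        rw [hk1, hk2, hs]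
        simp only [Prod.mk.injEq]
        refine ⟨by first | trivial | linarith, by first | trivial | linarith, by first | trivial | linarith⟩
    · -- the partially filled space takes the bike
      have htne : (-p) % m ≠ 0 := fun hz => hp ((pv_neg_emod_zero p m).mp hz)
      rw [pvParkLoopA, if_pos (by rw [hmod]; exact hp),
          ih (p+1) r c hr, pv_emod_step p m hm hp]
      have hCrw : (-p) % m - 1 + m * r = ((-p) % m + m * r) - 1 := by ring
      have h1C : 1 ≤ (-p) % m + m * r := by omega
      rw [hCrw, pv_min_shift (f : Int) _ hf0 h1C, hcast]
      have harg : min ((f:Int)+1) ((-p) % m + m * r) - 1 - ((-p) % m - 1) + m - 1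
          = min ((f:Int)+1) ((-p) % m + m * r) - (-p) % m + m - 1 := by ring
      rw [harg]
      simp only [Prod.mk.injEq]
      refine ⟨by first | trivial | linarith, by first | trivial | linarith, by first | trivial | linarith⟩

-- The whole equivalence, under the hypothesis that A's truncating int(n/m) agrees with floor
-- division (true whenever n ≥ 0, m = 1, or m ∣ n — i.e. everywhere outside D_).
theorem pv_main (n p r m : Int) (hm : 1 ≤ m) (hdiv : Int.tdiv n m = n / m) :
    bicycle_parked_in_motorcycle_space_event n p r m
      = bicycle_parked_in_motorcycle_space_event_alt n p r m := by
  have hm0 : m ≠ 0 := by omega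
  have hmpos : (0:Int) < m := by omega
  unfold bicycle_parked_in_motorcycle_space_event bicycle_parked_in_motorcycle_space_event_alt
  by_cases h0 : n = 0
  · simp [h0]
  · rw [if_neg h0, if_neg h0, hdiv]
    have hnb0 : 0 ≤ n % m := Int.emod_nonneg _ hm0
    have hnbm : n % m < m := Int.emod_lt_of_pos _ hmpos
    have hcast : ((n % m).toNat : Int) = n % m := Int.toNat_of_nonneg hnb0
    by_cases h1 : m = 1
    · -- m = 1: A delegates to vehicle_parked_event; B's closed form collapses to it
      subst h1
      rw [if_pos rfl]
      unfold vehicle_parked_event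
      rw [if_neg h0]
      simp only [PySem.Int.floordiv_eq_ediv_of_pos (show (0:Int) < 1 by norm_num),
                 PySem.Int.mod_eq_emod_of_pos (show (0:Int) < 1 by norm_num),
                 Int.ediv_one, Int.emod_one, one_mul]
      by_cases h2 : n ≤ r
      · rw [if_pos h2, if_pos h2]
        simp only [List.cons.injEq, and_true]
        refine ⟨?_, ?_, ?_⟩ <;> first | trivial | omega
      · rw [if_neg h2, if_neg h2]
        simp only [List.cons.injEq, and_true]
        refine ⟨?_, ?_, ?_⟩ <;> first | trivial | omega
    · have hm2 : 2 ≤ m := by omega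
      rw [if_neg h1]
      simp only [PySem.Int.floordiv_eq_ediv_of_pos hmpos, PySem.Int.mod_eq_emod_of_pos hmpos]
      by_cases h2 : n / m ≤ r
      · -- all full spaces fit
        rw [if_pos h2, if_pos h2]
        rw [pvParkLoopA_eq m hm _ _ _ 0 (by omega), hcast]
        simp only [List.cons.injEq, and_true]
        refine ⟨trivial, trivial, by simp⟩
      · -- not enough spaces: fill everything, top up, the rest cannot park
        rw [if_neg h2, if_neg h2]
        have hsr1 : 1 ≤ n / m - r := by omega
        have hc00 : 0 ≤ m * (n / m - r) := mul_nonneg (by omega) (by omega)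
        have hmle : m * 1 ≤ m * (n / m - r) :=
          mul_le_mul_of_nonneg_left hsr1 (by omega)
        have ht0' : 0 ≤ (-(p + m * r)) % m := Int.emod_nonneg _ hm0
        have htm' : (-(p + m * r)) % m < m := Int.emod_lt_of_pos _ hmpos
        rw [pvTopUpA_eq m hm _ _ _ (Int.toNat_of_nonneg hc00).symm (by omega)]
        rw [pvParkLoopA_eq m hm _ _ _ _ (le_refl 0), hcast]
        have ht1 : (-(p + m * r + (-(p + m * r)) % m)) % m = 0 :=
          Int.emod_eq_zero_of_dvd ((dvd_neg).mpr (pv_dvd_add_neg_emod _ _))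
        rw [ht1]
        have hC : (0:Int) + m * 0 = 0 := by ring
        rw [hC]
        have hk : min (n % m) (0:Int) = 0 := min_eq_right hnb0
        rw [hk]
        have hs : ((0:Int) - 0 + m - 1) / m = 0 :=
          Int.ediv_eq_zero_of_lt (by omega) (by omega)
        rw [hs]
        simp only [List.cons.injEq, and_true]
        refine ⟨by simp, by simp, by simp⟩

-- ===== VERDICT (by name: the statement is the Claim_ definition above) =====
theorem bicycle_parked_in_motorcycle_space_event_spec : Claim_unchanged_bicycle_parked_in_motorcycle_space_event := by
  intro n p r m _hdom hpre hnd
  unfold Pre_bicycle_parked_in_motorcycle_space_event at hpre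
  unfold D_bicycle_parked_in_motorcycle_space_event at hnd
  apply pv_main n p r m hpre
  rcases lt_trichotomy n 0 with hlt | heq | hgt
  · by_cases h1 : m = 1
    · subst h1; rw [Int.tdiv_one, Int.ediv_one]
    · have hdvd : m ∣ n := by
        by_contra hnd2
        exact hnd ⟨hlt, by omega, hnd2⟩
      obtain ⟨q, rfl⟩ := hdvd
      rw [Int.mul_tdiv_cancel_left _ (by omega), Int.mul_ediv_cancel_left _ (by omega)]
  · subst heq; rw [Int.zero_tdiv, Int.zero_ediv]
  · rw [Int.tdiv_eq_ediv_of_nonneg (by omega)]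

theorem bicycle_parked_in_motorcycle_space_event_changed : Claim_changed_bicycle_parked_in_motorcycle_space_event := by
  unfold Claim_changed_bicycle_parked_in_motorcycle_space_event; decide
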